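-- pv_equiv track=rewrite | github.com/mglevitt/DSC20 | DSC20/hw05.py | do_you_have_me
-- ===== SOURCE A (Python) =====
-- def do_you_have_me(dic, item):
--     """Returns a key for which item exists
--     otherwise returns "Not there"
--     >>> do_you_have_me({"key1":[1,2,3,4], "key2": [5,4,7,8]}, 9)
--     'Not there'
--     >>> do_you_have_me({"key1":[1,2,3,4], "key2": [5,4,7,8]}, 1)
--     'key1'
--     >>> do_you_have_me({"key1":[1,2,3,4], "key2": [5,4,7,8]}, 4)
--     'key1'
--
--     +++++++++++++++++++++++++
--     WRITE YOUR DOCTESTS BELOW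
--     +++++++++++++++++++++++++
--     >>> do_you_have_me({"key1":[1,2,3,4,9,10], "key2": [5,4,7,10,8]}, 10)
--     'key1'
--     >>> do_you_have_me({"key1":[1,2,3,4], "key2": [5,4,7,8],"key3":[9,2,8,203,\
-- 4], "key4": [25,41,7,8,13,18]}, 18)
--     'key4'
--     >>> do_you_have_me({"key1":[1,2,3,4], "key2": [5,4,7,8]}, 21)
--     'Not there'
--     """
--     d={}
--     for i in dic.items():
--         for j in i[1]:
--             if j not in d:
--                 d.update({j:i[0]})
--     if item in d:
--         return d[item]
--     else:
--         return 'Not there'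
-- ===== SOURCE B (Python) =====
-- def do_you_have_me(dic, item):
--     for key, lst in dic.items():
--         if item in lst:
--             return key
--     return 'Not there'
-- ===== Notes on version B (the rewrite author's own statement) =====
-- stated objective: simpler
-- what changed: Replaces A's build-a-full-value-to-first-key index dict followed by one lookup with a direct early-exiting scan over the items that returns the first key whose list contains the item.
import Mathlib
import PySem

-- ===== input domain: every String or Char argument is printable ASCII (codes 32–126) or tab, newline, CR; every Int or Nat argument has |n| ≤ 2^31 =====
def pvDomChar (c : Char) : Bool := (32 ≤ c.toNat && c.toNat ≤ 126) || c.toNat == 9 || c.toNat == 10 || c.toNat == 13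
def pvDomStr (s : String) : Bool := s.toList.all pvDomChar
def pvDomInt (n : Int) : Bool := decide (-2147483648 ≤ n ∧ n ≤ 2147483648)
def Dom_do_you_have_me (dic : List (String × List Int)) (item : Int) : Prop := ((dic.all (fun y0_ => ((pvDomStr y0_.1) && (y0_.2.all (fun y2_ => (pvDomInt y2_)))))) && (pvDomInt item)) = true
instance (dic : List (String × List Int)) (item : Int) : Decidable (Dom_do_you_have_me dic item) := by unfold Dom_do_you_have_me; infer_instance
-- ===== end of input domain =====

-- B replaces A's build-full-value→first-key-dict-then-lookup with a direct early-exiting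
-- scan over the items (objective: simpler).

-- ===== PORT A =====
def do_you_have_me (dic : List (String × List Int)) (item : Int) : String :=
  -- d = {}; for i in dic.items(): for j in i[1]: if j not in d: d.update({j: i[0]})
  let d : PySem.Dict Int String :=
    dic.foldl (fun d i =>
      i.2.foldl (fun d j => if !(d.contains j) then d.insert j i.1 else d) d)
      PySem.Dict.empty
  -- if item in d: return d[item] else: return 'Not there'
  match d.get? item with
  | some v => v
  | none => "Not there"

-- ===== PORT B =====
def do_you_have_me_alt (dic : List (String × List Int)) (item : Int) : String :=
  match dic with
  | [] => "Not there"
  | (key, lst) :: rest => if lst.contains item then key else do_you_have_me_alt rest item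

-- ===== PRECONDITION & SPEC =====
def Spec_do_you_have_me (dic : List (String × List Int)) (item : Int) (out : String) : Prop := out = do_you_have_me_alt dic item
instance (dic : List (String × List Int)) (item : Int) (out : String) : Decidable (Spec_do_you_have_me dic item out) := by unfold Spec_do_you_have_me; infer_instance

-- ===== CLAIM (what is proved, stated in full; the proofs are below) =====
def Claim_equal_do_you_have_me : Prop := ∀ (dic : List (String × List Int)) (item : Int), Dom_do_you_have_me dic item → Spec_do_you_have_me dic item (do_you_have_me dic item)

-- ===== LEMMAS AND PROOFS =====

-- first key (as an Option) of the scan B performs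
def pvFirstKey (dic : List (String × List Int)) (item : Int) : Option String :=
  match dic with
  | [] => none
  | (key, lst) :: rest => if lst.contains item then some key else pvFirstKey rest item

theorem alt_eq_firstKey (dic : List (String × List Int)) (item : Int) :
    do_you_have_me_alt dic item = (pvFirstKey dic item).getD "Not there" := by
  induction dic with
  | nil => rfl
  | cons p rest ih =>
    obtain ⟨key, lst⟩ := p
    simp only [do_you_have_me_alt, pvFirstKey]
    split <;> simp [ih]

theorem inner_get? (item k : _) : ∀ (lst : List Int) (d : PySem.Dict Int String),
    (lst.foldl (fun d j => if !(d.contains j) then d.insert j k else d) d).get? item =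
      if d.contains item then d.get? item
      else if lst.contains item then some k else none := by
  intro lst
  induction lst with
  | nil =>
    intro d
    by_cases h : d.contains item = true
    · simp [h]
    · simp only [Bool.not_eq_true] at h
      simp [List.foldl, h, (PySem.Dict.get?_eq_none_iff_contains d item).mpr h]
  | cons j lst ih =>
    intro d
    simp only [List.foldl_cons]
    rw [ih]
    by_cases hj : d.contains j = true
    · simp only [hj, Bool.not_true, Bool.false_eq_true, if_false]
      by_cases hij : item = j
      · subst hij; simp [hj]
      · cases hd : d.contains item <;> simp_all
    · simp only [Bool.not_eq_true] at hj
      simp only [hj, Bool.not_false, if_true]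
      rw [PySem.Dict.contains_insert, PySem.Dict.get?_insert]
      by_cases hij : item = j
      · subst hij; simp [hj]
      · cases hd : d.contains item <;> simp_all

theorem outer_get? (item : Int) : ∀ (dic : List (String × List Int)) (d : PySem.Dict Int String),
    (dic.foldl (fun d i =>
        i.2.foldl (fun d j => if !(d.contains j) then d.insert j i.1 else d) d) d).get? item =
      if d.contains item then d.get? item else pvFirstKey dic item := by
  intro dic
  induction dic with
  | nil =>
    intro d
    by_cases h : d.contains item = true
    · simp [h]
    · simp only [Bool.not_eq_true] at h
      simp [List.foldl, h, (PySem.Dict.get?_eq_none_iff_contains d item).mpr h, pvFirstKey]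
  | cons p rest ih =>
    intro d
    obtain ⟨key, lst⟩ := p
    simp only [List.foldl_cons]
    rw [ih, inner_get? item key lst d, pvFirstKey]
    rw [PySem.Dict.contains_eq_isSome_get?, inner_get? item key lst d]
    by_cases hd : d.contains item = true
    · simp [hd, ← PySem.Dict.contains_eq_isSome_get?]
    · by_cases hl : item ∈ lst <;> simp [hd, hl]

-- ===== VERDICT (by name: the statement is the Claim_ definition above) =====
theorem do_you_have_me_spec : Claim_equal_do_you_have_me := by
  intro dic item _
  unfold Spec_do_you_have_me do_you_have_me
  rw [alt_eq_firstKey]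
  simp only [outer_get? item dic PySem.Dict.empty, PySem.Dict.contains_empty, Bool.false_eq_true,
    if_false]
  cases pvFirstKey dic item <;> rfl
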